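-- pv_equiv track=rewrite | github.com/GalRaz/icatcher_plus | parsers.py | get_trial_intervals
-- ===== SOURCE A (Python) =====
-- def get_trial_intervals(start, sorted_responses):
--     """
--     gets trial ending times, in a non-inclusive manner (the frames indicate where the trial is not acive anymore)
--     :param label_path: path to label file
--     :return:
--     """
--     trials_times = []
--     prev_frame = start
--     for response in sorted_responses:
--         if response[1] == 0:
--             trials_times.append([prev_frame, response[0]])  # are trial times inclusive or not?
--             prev_frame = response[0]
--     return trials_times
-- ===== SOURCE B (Python) =====
-- def get_trial_intervals(start, sorted_responses):
--     # Reverse traversal: track the right endpoint of the pending interval,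
--     # emit intervals back-to-front, then reverse the output once.
--     out = []
--     upper = None
--     for frame, flag in reversed(sorted_responses):
--         if flag == 0:
--             if upper is not None:
--                 out.append([frame, upper])
--             upper = frame
--     if upper is not None:
--         out.append([start, upper])
--     out.reverse()
--     return out
-- ===== Notes on version B (the rewrite author's own statement) =====
-- stated objective: alternative
-- what changed: Instead of A's forward loop threading prev_frame as the left endpoint, B traverses the responses in reverse, tracks the pending right endpoint, builds the interval list back-to-front and reverses it once at the end.
import Mathlib
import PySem

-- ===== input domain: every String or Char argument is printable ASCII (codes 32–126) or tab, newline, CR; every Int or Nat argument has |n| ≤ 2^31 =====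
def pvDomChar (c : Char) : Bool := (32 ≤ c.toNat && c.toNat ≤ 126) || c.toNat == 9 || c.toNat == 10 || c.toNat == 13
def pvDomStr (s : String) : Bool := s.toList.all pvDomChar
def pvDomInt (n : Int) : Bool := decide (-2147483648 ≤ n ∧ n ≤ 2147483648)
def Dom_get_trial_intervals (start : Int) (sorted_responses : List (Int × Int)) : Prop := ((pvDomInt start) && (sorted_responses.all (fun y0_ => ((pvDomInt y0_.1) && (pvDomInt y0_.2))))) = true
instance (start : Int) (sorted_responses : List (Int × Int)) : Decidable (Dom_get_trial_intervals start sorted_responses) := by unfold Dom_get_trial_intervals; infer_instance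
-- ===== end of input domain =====

-- B replaces A's forward prev_frame loop with a reverse traversal that tracks the pending right endpoint and builds the output back-to-front (alternative, same cost).

-- ===== PORT A =====
-- A: one forward loop with mutable prev_frame and an accumulator list.
def get_trial_intervals (start : Int) (sorted_responses : List (Int × Int)) : List (List Int) :=
  let st := sorted_responses.foldl
    (fun (st : List (List Int) × Int) response =>
      if response.2 == 0 then (st.1 ++ [[st.2, response.1]], response.1) else st)
    ([], start)
  st.1

-- ===== PORT B =====
-- B: walk the responses reversed, tracking the pending right endpoint `upper`,
-- appending intervals back-to-front; finish with [start, upper] and reverse once.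
def get_trial_intervals_alt (start : Int) (sorted_responses : List (Int × Int)) : List (List Int) :=
  let st := sorted_responses.reverse.foldl
    (fun (st : List (List Int) × Option Int) (r : Int × Int) =>
      if r.2 == 0 then
        match st.2 with
        | some u => (st.1 ++ [[r.1, u]], some r.1)
        | none => (st.1, some r.1)
      else st)
    ([], none)
  let out := match st.2 with
    | some u => st.1 ++ [[start, u]]
    | none => st.1
  out.reverse

-- ===== PRECONDITION & SPEC =====
def Spec_get_trial_intervals (start : Int) (sorted_responses : List (Int × Int)) (out : List (List Int)) : Prop := out = get_trial_intervals_alt start sorted_responses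
instance (start : Int) (sorted_responses : List (Int × Int)) (out : List (List Int)) : Decidable (Spec_get_trial_intervals start sorted_responses out) := by unfold Spec_get_trial_intervals; infer_instance

-- ===== CLAIM (what is proved, stated in full; the proofs are below) =====
def Claim_equal_get_trial_intervals : Prop := ∀ (start : Int) (sorted_responses : List (Int × Int)), Dom_get_trial_intervals start sorted_responses → Spec_get_trial_intervals start sorted_responses (get_trial_intervals start sorted_responses)

-- ===== LEMMAS AND PROOFS =====

-- canonical form: pair prev with consecutive end frames
def pvChain (prev : Int) : List Int → List (List Int)
  | [] => []
  | e :: es => [prev, e] :: pvChain e es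

-- A's loop computes pvChain of the zero-flag frames
theorem pvLoopA_eq_chain (sr : List (Int × Int)) (prev : Int) (acc : List (List Int)) :
    (sr.foldl (fun (st : List (List Int) × Int) response =>
        if response.2 == 0 then (st.1 ++ [[st.2, response.1]], response.1) else st) (acc, prev)).1
      = acc ++ pvChain prev ((sr.filter (fun r => r.2 == 0)).map (fun r => r.1)) := by
  induction sr generalizing prev acc with
  | nil => simp [pvChain]
  | cons r rest ih =>
    by_cases h : (r.2 == 0) = true
    · rw [List.foldl_cons, if_pos h, ih]
      simp [h, pvChain]
    · rw [List.foldl_cons, if_neg h, ih]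
      simp [h]

-- a step that is the identity off the filter acts only on the filtered list
theorem pvFoldl_filter_step {α σ : Type} (p : α → Bool) (g : σ → α → σ) (l : List α) (s : σ) :
    l.foldl (fun s x => if p x then g s x else s) s
      = (l.filter p).foldl g s := by
  induction l generalizing s with
  | nil => simp
  | cons x xs ih =>
    by_cases h : p x = true
    · simp [h, ih]
    · simp [h, ih]

-- B's core fold over the reversed zero-flag pairs, characterised via foldr
theorem pvFoldrB_eq (p : Int × Int) (ps : List (Int × Int)) :
    (p :: ps).foldr
      (fun r (st : List (List Int) × Option Int) =>
        match st.2 with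
        | some u => (st.1 ++ [[r.1, u]], some r.1)
        | none => (st.1, some r.1))
      ([], none)
    = ((pvChain p.1 (ps.map (fun r => r.1))).reverse, some p.1) := by
  induction ps generalizing p with
  | nil => simp [pvChain]
  | cons q qs ih =>
    rw [List.foldr_cons, ih q]
    simp [pvChain]

-- ===== VERDICT (by name: the statement is the Claim_ definition above) =====
theorem get_trial_intervals_spec : Claim_equal_get_trial_intervals := by
  intro start sr _
  unfold Spec_get_trial_intervals get_trial_intervals get_trial_intervals_alt
  simp only []
  rw [pvLoopA_eq_chain,
      pvFoldl_filter_step (fun (r : Int × Int) => r.2 == 0)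
        (fun (st : List (List Int) × Option Int) r =>
          match st.2 with
          | some u => (st.1 ++ [[r.1, u]], some r.1)
          | none => (st.1, some r.1)) sr.reverse,
      List.filter_reverse, List.foldl_reverse]
  cases h : sr.filter (fun r => r.2 == 0) with
  | nil => simp [pvChain]
  | cons p ps =>
    rw [pvFoldrB_eq]
    simp [pvChain]
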